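-- pv_equiv track=rewrite | github.com/Pantsworth/SousChefBot | project/util.py | handle_fractions
-- ===== SOURCE A (Python) =====
-- def handle_fractions(string):
--     """
--
--     :param string: string of some kind
--     :return: string with all fractions replaced with natural language equivalents
--     """
--     index = string.find('/')
--     result = string
--
--     while index is not -1:
--         denominator = index+1
--         result = result.replace(result[index:index+2], denom(result[denominator]))
--         index = result.find('/')
--         # print index
--         # print result
--     return result
--
-- def denom(x):
--     return {
--         '2': " half",
--         '3': " third",
--         '4': " fourth",
--         '5': " fifth",
--         '6': " sixth",
--         '7': " seventh"
--     }.get(x, " ")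
-- ===== SOURCE B (Python) =====
-- def handle_fractions(string):
--     """
--     One left-to-right scan: copy ordinary characters; at each '/', emit the
--     word for the character that follows it and skip both.
--     (On a trailing '/' the lookup string[i + 1] raises IndexError, as in A.)
--     """
--     pieces = []
--     i = 0
--     while i < len(string):
--         if string[i] == '/':
--             pieces.append(denom(string[i + 1]))
--             i += 2
--         else:
--             pieces.append(string[i])
--             i += 1
--     return ''.join(pieces)
--
--
-- def denom(x):
--     return {
--         '2': " half",
--         '3': " third",
--         '4': " fourth",
--         '5': " fifth",
--         '6': " sixth",
--         '7': " seventh"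
--     }.get(x, " ")
-- ===== Notes on version B (the rewrite author's own statement) =====
-- stated objective: idiomatic
-- what changed: Replaced the repeated find-first-slash / replace-all-occurrences loop (which rescans and rebuilds the whole string once per fraction) by a single left-to-right scan that copies characters and expands each slash-denominator pair in place.
-- outside the precondition, e.g. on handle_fractions('/a//a'): A returns '  ', B returns '  a'; on handle_fractions('//'): A returns ' ', B returns ' '
import Mathlib
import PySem

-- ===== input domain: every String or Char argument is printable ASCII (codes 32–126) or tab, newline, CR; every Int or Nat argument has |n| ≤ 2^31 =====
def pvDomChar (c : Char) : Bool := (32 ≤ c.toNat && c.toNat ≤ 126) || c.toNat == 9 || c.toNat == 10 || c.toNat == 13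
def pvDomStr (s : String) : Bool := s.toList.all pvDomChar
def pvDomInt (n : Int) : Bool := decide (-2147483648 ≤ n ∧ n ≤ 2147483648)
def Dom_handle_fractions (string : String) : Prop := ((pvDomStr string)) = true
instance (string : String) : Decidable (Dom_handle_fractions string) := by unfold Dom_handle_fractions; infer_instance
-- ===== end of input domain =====

-- B replaces A's repeated find-first-slash/replace-all loop by a single left-to-right
-- scan that expands each slash-denominator pair in place (objective: idiomatic).


-- denom: literal dict, .get with default " " (working over List Char); the helper
-- is textually identical in A and in Source B, so both ports share this one definition.
def denom (x : Char) : List Char :=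
  PySem.Dict.getD
    ⟨[('2', " half".toList), ('3', " third".toList), ('4', " fourth".toList),
      ('5', " fifth".toList), ('6', " sixth".toList), ('7', " seventh".toList)]⟩
    x " ".toList

-- ===== PORT A =====
-- the while loop; fuel = length+1 bounds the iteration count (each pass removes at
-- least one '/' from the string, so at most count('/')+1 ≤ length+1 passes happen).
-- `.getD ' '` is only reached where Python raises IndexError (excluded by Pre_).
def aLoop : Nat → List Char → List Char
  | 0, r => r
  | fuel+1, r =>
    let index := PySem.Chars.find r ['/']
    if index = -1 then r
    else aLoop fuel (PySem.Chars.replace r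
      (PySem.List.slice r (some index) (some (index + 2)))
      (denom ((PySem.List.pyGet? r (index + 1)).getD ' ')))

def handle_fractions (string : String) : String :=
  String.ofList (aLoop (string.toList.length + 1) string.toList)

-- ===== PORT B =====
-- one left-to-right scan.  On ['/'] alone Python B raises IndexError (outside Pre_).
def altGo : List Char → List Char
  | [] => []
  | ['/'] => []
  | '/' :: d :: rest => denom d ++ altGo rest
  | c :: rest => c :: altGo rest

def handle_fractions_alt (string : String) : String :=
  String.ofList (altGo string.toList)

-- ===== PRECONDITION & SPEC =====
-- Pre_ excludes (a) strings ending in '/', where both A and B raise IndexError, and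
-- (b) strings containing '//', a malformed fraction marker on which A's replace-all
-- of the first two-character pattern can consume a later fraction's slash and cascade
-- — a corner no caller specifies, where A's and B's values are both defensible.
def Pre_handle_fractions (string : String) : Prop :=
  PySem.Str.isIn "//" string = false ∧ PySem.Str.endswith string "/" = false
instance (string : String) : Decidable (Pre_handle_fractions string) := by
  unfold Pre_handle_fractions; infer_instance

def pvWitness_handle_fractions : String := "1/2 cup of sugar"

def Spec_handle_fractions (string : String) (out : String) : Prop := out = handle_fractions_alt string
instance (string : String) (out : String) : Decidable (Spec_handle_fractions string out) := by unfold Spec_handle_fractions; infer_instance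

-- ===== CLAIM (what is proved, stated in full; the proofs are below) =====
def Claim_equal_handle_fractions : Prop := ∀ (string : String), Dom_handle_fractions string → Pre_handle_fractions string → Spec_handle_fractions string (handle_fractions string)

-- ===== LEMMAS AND PROOFS =====

-- well-formed strings: no "//" and no trailing '/'
def wfChars : List Char → Bool
  | [] => true
  | ['/'] => false
  | '/' :: d :: rest => (d != '/') && wfChars (d :: rest)
  | _ :: rest => wfChars rest

-- replace-all of the two-character pattern ['/', x] by d, as a plain recursion
def repl (x : Char) (d : List Char) : List Char → List Char
  | [] => []
  | [c] => [c]
  | c :: y :: t => if c = '/' ∧ y = x then d ++ repl x d t else c :: repl x d (y :: t)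

theorem denom_no_slash (x : Char) : '/' ∉ denom x := by
  by_cases h2 : x = '2'; · subst h2; decide
  by_cases h3 : x = '3'; · subst h3; decide
  by_cases h4 : x = '4'; · subst h4; decide
  by_cases h5 : x = '5'; · subst h5; decide
  by_cases h6 : x = '6'; · subst h6; decide
  by_cases h7 : x = '7'; · subst h7; decide
  unfold denom PySem.Dict.getD PySem.Dict.get?
  simp only [List.find?]
  rw [beq_eq_false_iff_ne.mpr (fun h => h2 h.symm), beq_eq_false_iff_ne.mpr (fun h => h3 h.symm),
      beq_eq_false_iff_ne.mpr (fun h => h4 h.symm), beq_eq_false_iff_ne.mpr (fun h => h5 h.symm),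
      beq_eq_false_iff_ne.mpr (fun h => h6 h.symm), beq_eq_false_iff_ne.mpr (fun h => h7 h.symm)]
  decide

theorem altGo_cons_ne {c : Char} (t : List Char) (h : c ≠ '/') :
    altGo (c :: t) = c :: altGo t := by
  match t with
  | [] => simp [altGo, h]
  | y :: t' => simp [altGo, h]

theorem wf_cons_ne {c : Char} (t : List Char) (h : c ≠ '/') :
    wfChars (c :: t) = wfChars t := by
  match t with
  | [] => simp [wfChars, h]
  | y :: t' => simp [wfChars, h]

theorem repl_cons_ne {c : Char} (x : Char) (d t : List Char) (h : c ≠ '/') :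
    repl x d (c :: t) = c :: repl x d t := by
  match t with
  | [] => simp [repl]
  | y :: t' => simp [repl, h]

theorem replace_go_eq (x : Char) (d : List Char) :
    ∀ (fuel : Nat) (l acc : List Char), l.length ≤ fuel →
      PySem.Chars.replace.go ['/', x] d fuel l acc = acc.reverse ++ repl x d l := by
  intro fuel
  induction fuel with
  | zero =>
    intro l acc hl
    have : l = [] := List.length_eq_zero_iff.mp (Nat.le_zero.mp hl)
    subst this; simp [PySem.Chars.replace.go, repl]
  | succ fuel ih =>
    intro l acc hl
    match l with
    | [] => simp [PySem.Chars.replace.go, repl]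
    | c :: t =>
      rw [PySem.Chars.replace.go]
      by_cases hp : List.isPrefixOf ['/', x] (c :: t) = true
      · rw [if_pos hp]
        rw [List.isPrefixOf_iff_prefix] at hp
        obtain ⟨r, hr⟩ := hp
        simp only [List.cons_append, List.nil_append] at hr
        injection hr with hc hr'
        subst hc
        subst hr'
        have hlen : r.length ≤ fuel := by simp at hl; omega
        have hdrop : List.drop (['/', x].length) ('/' :: x :: r) = r := by simp
        rw [hdrop, ih r _ hlen]
        simp [repl]
      · rw [if_neg hp]
        have hlen : t.length ≤ fuel := by simp at hl; omega
        rw [ih t _ hlen]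
        have hs : repl x d (c :: t) = c :: repl x d t := by
          match t with
          | [] => simp [repl]
          | y :: t' =>
            have hcy : ¬ (c = '/' ∧ y = x) := by
              rintro ⟨rfl, rfl⟩
              exact hp (List.isPrefixOf_iff_prefix.mpr ⟨t', rfl⟩)
            simp [repl, hcy]
        rw [hs]
        simp

theorem replace_eq (x : Char) (d l : List Char) :
    PySem.Chars.replace l ['/', x] d = repl x d l := by
  rw [PySem.Chars.replace, if_neg (by simp : ¬ (['/', x].isEmpty = true))]
  exact replace_go_eq x d l.length l [] (le_refl _)

theorem altGo_append_no_slash (u z : List Char) (h : ∀ c ∈ u, c ≠ '/') :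
    altGo (u ++ z) = u ++ altGo z := by
  induction u with
  | nil => simp
  | cons c u' ih =>
    have hc : c ≠ '/' := h c (by simp)
    rw [List.cons_append, altGo_cons_ne _ hc, ih (fun c hc' => h c (by simp [hc']))]
    rfl

theorem altGo_no_slash (l : List Char) (h : ∀ c ∈ l, c ≠ '/') : altGo l = l := by
  have := altGo_append_no_slash l [] h
  simpa [altGo] using this

theorem wf_append_no_slash (u z : List Char) (h : ∀ c ∈ u, c ≠ '/') :
    wfChars (u ++ z) = wfChars z := by
  induction u with
  | nil => simp
  | cons c u' ih =>
    have hc : c ≠ '/' := h c (by simp)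
    rw [List.cons_append, wf_cons_ne _ hc, ih (fun c hc' => h c (by simp [hc']))]

theorem wf_tail {c : Char} {t : List Char} (h : wfChars (c :: t) = true) :
    wfChars t = true := by
  by_cases hc : c = '/'
  · subst hc
    match t with
    | [] => rfl
    | y :: t' =>
      simp only [wfChars, Bool.and_eq_true, bne_iff_ne] at h
      exact h.2
  · rwa [wf_cons_ne _ hc] at h

theorem wf_drop {l : List Char} (h : wfChars l = true) (n : Nat) :
    wfChars (l.drop n) = true := by
  induction n generalizing l with
  | zero => simpa using h
  | succ n ih =>
    match l with
    | [] => simpa using h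
    | c :: t =>
      rw [List.drop_succ_cons]
      exact ih (wf_tail h)

theorem repl_append_no_slash (x : Char) (d : List Char) (u z : List Char)
    (h : ∀ c ∈ u, c ≠ '/') : repl x d (u ++ z) = u ++ repl x d z := by
  induction u with
  | nil => simp
  | cons c u' ih =>
    have hc : c ≠ '/' := h c (by simp)
    rw [List.cons_append, repl_cons_ne _ _ _ hc, ih (fun c hc' => h c (by simp [hc']))]
    rfl

theorem count_repl_le (x : Char) (d : List Char) (hd : '/' ∉ d) :
    ∀ (k : Nat) (l : List Char), l.length ≤ k →
      (repl x d l).count '/' ≤ l.count '/' := by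
  intro k
  induction k with
  | zero =>
    intro l hl
    have : l = [] := List.length_eq_zero_iff.mp (Nat.le_zero.mp hl)
    subst this; simp [repl]
  | succ k ih =>
    intro l hl
    match l with
    | [] => simp [repl]
    | [c] => simp [repl]
    | c :: y :: t =>
      by_cases hcy : c = '/' ∧ y = x
      · have : repl x d (c :: y :: t) = d ++ repl x d t := by simp [repl, hcy]
        rw [this]
        have h1 : (d ++ repl x d t).count '/' = (repl x d t).count '/' := by
          simp [List.count_append, List.count_eq_zero.mpr hd]
        rw [h1]
        have h2 : (repl x d t).count '/' ≤ t.count '/' := ih t (by simp at hl; omega)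
        calc (repl x d t).count '/' ≤ t.count '/' := h2
          _ ≤ (c :: y :: t).count '/' := by
              simp [List.count_cons]; omega
      · have : repl x d (c :: y :: t) = c :: repl x d (y :: t) := by simp [repl, hcy]
        rw [this]
        have h2 : (repl x d (y :: t)).count '/' ≤ (y :: t).count '/' :=
          ih (y :: t) (by simp at hl ⊢; omega)
        simp only [List.count_cons] at h2 ⊢
        omega

theorem wf_repl (x : Char) (d : List Char) (hd : ∀ c ∈ d, c ≠ '/') :
    ∀ (k : Nat) (l : List Char), l.length ≤ k → wfChars l = true →
      wfChars (repl x d l) = true := by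
  intro k
  induction k with
  | zero =>
    intro l hl _
    have : l = [] := List.length_eq_zero_iff.mp (Nat.le_zero.mp hl)
    subst this; simp [repl, wfChars]
  | succ k ih =>
    intro l hl hwf
    match l with
    | [] => simp [repl, wfChars]
    | [c] =>
      simp only [repl]
      exact hwf
    | c :: y :: t =>
      by_cases hcy : c = '/' ∧ y = x
      · have hrepl : repl x d (c :: y :: t) = d ++ repl x d t := by simp [repl, hcy]
        rw [hrepl, wf_append_no_slash _ _ hd]
        have hwft : wfChars t = true := wf_tail (wf_tail hwf)
        exact ih t (by simp at hl; omega) hwft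
      · have hrepl : repl x d (c :: y :: t) = c :: repl x d (y :: t) := by
          simp [repl, hcy]
        rw [hrepl]
        by_cases hc : c = '/'
        · subst hc
          have hy : y ≠ '/' := by
            simp only [wfChars, Bool.and_eq_true, bne_iff_ne] at hwf
            exact hwf.1
          have hrepl2 : repl x d (y :: t) = y :: repl x d t := repl_cons_ne _ _ _ hy
          rw [hrepl2]
          have hwfyt : wfChars (y :: t) = true := by
            simp only [wfChars, Bool.and_eq_true, bne_iff_ne] at hwf
            exact hwf.2
          have : wfChars (y :: repl x d t) = true := by
            rw [wf_cons_ne _ hy]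
            rw [wf_cons_ne _ hy] at hwfyt
            exact ih t (by simp at hl; omega) hwfyt
          simpa [wfChars, hy] using this
        · rw [wf_cons_ne _ hc]
          rw [wf_cons_ne _ hc] at hwf
          exact ih (y :: t) (by simp at hl ⊢; omega) hwf

theorem altGo_repl (x : Char) :
    ∀ (k : Nat) (l : List Char), l.length ≤ k → wfChars l = true →
      altGo (repl x (denom x) l) = altGo l := by
  intro k
  induction k with
  | zero =>
    intro l hl _
    have : l = [] := List.length_eq_zero_iff.mp (Nat.le_zero.mp hl)
    subst this; simp [repl]
  | succ k ih =>
    intro l hl hwf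
    match l with
    | [] => simp [repl]
    | [c] => simp [repl]
    | c :: y :: t =>
      by_cases hcy : c = '/' ∧ y = x
      · have hrepl : repl x (denom x) (c :: y :: t) = denom x ++ repl x (denom x) t := by
          simp [repl, hcy]
        rw [hrepl,
          altGo_append_no_slash _ _ (fun c hc hc' => denom_no_slash x (hc' ▸ hc)),
          ih t (by simp at hl; omega) (wf_tail (wf_tail hwf))]
        rw [hcy.1, hcy.2]
        simp [altGo]
      · have hrepl : repl x (denom x) (c :: y :: t) = c :: repl x (denom x) (y :: t) := by
          simp [repl, hcy]
        rw [hrepl]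
        by_cases hc : c = '/'
        · subst hc
          have hy : y ≠ '/' := by
            simp only [wfChars, Bool.and_eq_true, bne_iff_ne] at hwf
            exact hwf.1
          rw [repl_cons_ne _ _ _ hy]
          have hwft : wfChars t = true := wf_tail (wf_tail hwf)
          simp only [altGo]
          rw [ih t (by simp at hl; omega) hwft]
        · rw [altGo_cons_ne _ hc, altGo_cons_ne _ hc]
          rw [wf_cons_ne _ hc] at hwf
          rw [ih (y :: t) (by simp at hl ⊢; omega) hwf]

theorem wf_of_pre (l : List Char)
    (h1 : ¬ (['/', '/'] <:+: l)) (h2 : ¬ (['/'] <:+ l)) : wfChars l = true := by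
  induction l with
  | nil => rfl
  | cons c t ih =>
    have ht1 : ¬ (['/', '/'] <:+: t) := fun h => h1 (h.trans (List.suffix_cons c t).isInfix)
    have ht2 : ¬ (['/'] <:+ t) := fun h => h2 (h.trans (List.suffix_cons c t))
    by_cases hc : c = '/'
    · subst hc
      match t with
      | [] => exact absurd (List.suffix_refl _) h2
      | y :: t' =>
        have hy : y ≠ '/' := by
          intro hy
          exact h1 (hy ▸ (List.prefix_iff_eq_take.mpr rfl).isInfix)
        simp only [wfChars, Bool.and_eq_true, bne_iff_ne]
        exact ⟨hy, ih ht1 ht2⟩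
    · rw [wf_cons_ne _ hc]
      exact ih ht1 ht2

theorem main_loop : ∀ (fuel : Nat) (l : List Char), wfChars l = true →
    l.count '/' < fuel → aLoop fuel l = altGo l := by
  intro fuel
  induction fuel with
  | zero => intro l _ hcnt; omega
  | succ fuel ih =>
    intro l hwf hcnt
    show aLoop (fuel + 1) l = altGo l
    rw [aLoop]
    by_cases hfind : PySem.Chars.find l ['/'] = -1
    · simp only [hfind]
      refine (altGo_no_slash l ?_).symm
      intro c hc hc'
      subst hc'
      exact (PySem.Chars.find_eq_neg_one_iff l ['/']).mp hfind
        ((List.singleton_infix_iff '/' l).mpr hc)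
    · simp only [if_neg hfind]
      have h0 : 0 ≤ PySem.Chars.find l ['/'] := by
        have := PySem.Chars.neg_one_le_find (s := l) (sub := ['/'])
        omega
      obtain ⟨hpre, hmin⟩ := PySem.Chars.find_spec h0
      set n : Nat := (PySem.Chars.find l ['/']).toNat with hn
      have hfn : PySem.Chars.find l ['/'] = (n : Int) := (Int.toNat_of_nonneg h0).symm
      obtain ⟨rest, hrest⟩ := hpre
      -- l.drop n = '/' :: rest
      have hdrop : l.drop n = '/' :: rest := by simpa using hrest.symm
      have hnlt : n < l.length := by
        by_contra hge
        rw [List.drop_eq_nil_of_le (by omega)] at hdrop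
        exact absurd hdrop (by simp)
      have hu : ∀ c ∈ l.take n, c ≠ '/' := by
        intro c hc hc'
        subst hc'
        obtain ⟨j, hj, hjc⟩ := List.mem_take_iff_getElem.mp hc
        have hjn : j < n := by omega
        have hjl : j < l.length := by omega
        refine hmin j hjn ?_
        rw [List.drop_eq_getElem_cons hjl]
        exact ⟨l.drop (j + 1), by simp [hjc]⟩
      -- rest = x :: v with x ≠ '/'
      have hwfd : wfChars ('/' :: rest) = true := hdrop ▸ wf_drop hwf n
      obtain ⟨x, v, hxv, hx⟩ : ∃ x v, rest = x :: v ∧ x ≠ '/' := by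
        match rest, hwfd with
        | x :: v, hwfd =>
          simp only [wfChars, Bool.and_eq_true, bne_iff_ne] at hwfd
          exact ⟨x, v, rfl, hwfd.1⟩
      subst hxv
      have hl : l = l.take n ++ '/' :: x :: v := by
        conv_lhs => rw [← List.take_append_drop n l]
        rw [hdrop]
      -- the character after the slash
      have hget : PySem.List.pyGet? l (PySem.Chars.find l ['/'] + 1) = some x := by
        rw [hfn]
        have : (n : Int) + 1 = ((n + 1 : Nat) : Int) := by push_cast; ring
        rw [this, PySem.List.pyGet?_natCast]
        rw [← List.getElem?_drop, hdrop]
        rfl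
      -- the pattern
      have hslice : PySem.List.slice l (some (PySem.Chars.find l ['/']))
          (some (PySem.Chars.find l ['/'] + 2)) = ['/', x] := by
        rw [hfn]
        have : (n : Int) + 2 = (n : Int) + ((2 : Nat) : Int) := by push_cast; ring
        rw [this, PySem.List.slice_natCast_add, hdrop]
        rfl
      rw [hget, hslice]
      simp only [Option.getD_some]
      rw [replace_eq]
      -- wf and count of the replaced string
      have hdns : ∀ c ∈ denom x, c ≠ '/' :=
        fun c hc hc' => denom_no_slash x (hc' ▸ hc)
      have hwf' : wfChars (repl x (denom x) l) = true :=
        wf_repl x (denom x) hdns l.length l (le_refl _) hwf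
      have hcount : (repl x (denom x) l).count '/' < l.count '/' := by
        have hrw : repl x (denom x) l = l.take n ++ denom x ++ repl x (denom x) v := by
          conv_lhs => rw [hl]
          rw [repl_append_no_slash _ _ _ _ hu]
          have : repl x (denom x) ('/' :: x :: v) = denom x ++ repl x (denom x) v := by
            simp [repl]
          rw [this, List.append_assoc]
        rw [hrw]
        have h1 : (l.take n).count '/' = 0 := List.count_eq_zero.mpr (fun h => hu '/' h rfl)
        have h2 : (denom x).count '/' = 0 := List.count_eq_zero.mpr (fun h => hdns '/' h rfl)
        have h3 : (repl x (denom x) v).count '/' ≤ v.count '/' :=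
          count_repl_le x (denom x) (fun h => hdns '/' h rfl) v.length v (le_refl _)
        have h4 : l.count '/' = (l.take n).count '/' + 1 + (x :: v).count '/' := by
          conv_lhs => rw [hl]
          simp [List.count_append, List.count_cons]
          omega
        simp only [List.count_append]
        rw [h4]
        simp [hx]
        omega
      rw [ih _ hwf' (by omega)]
      exact altGo_repl x l.length l (le_refl _) hwf

-- ===== VERDICT (by name: the statement is the Claim_ definition above) =====
theorem handle_fractions_spec : Claim_equal_handle_fractions := by
  intro string _ hpre
  unfold Spec_handle_fractions handle_fractions handle_fractions_alt
  congr 1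
  obtain ⟨h1, h2⟩ := hpre
  have hinfix : ¬ (['/', '/'] <:+: string.toList) := by
    intro h
    have := (PySem.Str.isIn_iff_infix "//" string).mpr h
    rw [h1] at this
    exact absurd this (by simp)
  have hsuffix : ¬ (['/'] <:+ string.toList) := by
    intro h
    have : PySem.Str.endswith string "/" = true := by
      simp [PySem.Str.endswith, PySem.Chars.endswith, List.isSuffixOf_iff_suffix]
      exact h
    rw [h2] at this
    exact absurd this (by simp)
  have hwf := wf_of_pre string.toList hinfix hsuffix
  exact main_loop (string.toList.length + 1) string.toList hwf
    (Nat.lt_succ_of_le (List.count_le_length))
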